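-- pv_equiv track=rewrite | github.com/Michael-huo/ExpHub | scripts/_prompt/profile.py | _has_obvious_conflict
-- ===== SOURCE A (Python) =====
-- def _has_obvious_conflict(counts, default, total):
--     # type: (Dict[str, int], str, int) -> bool
--     active = []
--     for key, value in counts.items():
--         if str(key) == str(default):
--             continue
--         if int(value) <= 0:
--             continue
--         active.append((str(key), int(value)))
--     if len(active) <= 1:
--         return False
--     active.sort(key=lambda item: (-int(item[1]), item[0]))
--     if int(active[1][1]) >= max(2, (int(total) + 2) // 3):
--         return True
--     return False
-- ===== SOURCE B (Python) =====
-- def _has_obvious_conflict(counts, default, total):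
--     # type: (Dict[str, int], str, int) -> bool
--     vals = [int(v) for k, v in counts.items()
--             if str(k) != str(default) and int(v) > 0]
--     if len(vals) < 2:
--         return False
--     threshold = max(2, (int(total) + 2) // 3)
--     # second-largest active value >= threshold  <=>  at least two active values >= threshold
--     return sum(1 for v in vals if v >= threshold) >= 2
-- ===== Notes on version B (the rewrite author's own statement) =====
-- stated objective: simpler
-- what changed: Replaces the sort-then-index-the-second-element step by a single count: the second-largest value is >= the threshold iff at least two values are, so the sort and tuple tie-break disappear.
import Mathlib
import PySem

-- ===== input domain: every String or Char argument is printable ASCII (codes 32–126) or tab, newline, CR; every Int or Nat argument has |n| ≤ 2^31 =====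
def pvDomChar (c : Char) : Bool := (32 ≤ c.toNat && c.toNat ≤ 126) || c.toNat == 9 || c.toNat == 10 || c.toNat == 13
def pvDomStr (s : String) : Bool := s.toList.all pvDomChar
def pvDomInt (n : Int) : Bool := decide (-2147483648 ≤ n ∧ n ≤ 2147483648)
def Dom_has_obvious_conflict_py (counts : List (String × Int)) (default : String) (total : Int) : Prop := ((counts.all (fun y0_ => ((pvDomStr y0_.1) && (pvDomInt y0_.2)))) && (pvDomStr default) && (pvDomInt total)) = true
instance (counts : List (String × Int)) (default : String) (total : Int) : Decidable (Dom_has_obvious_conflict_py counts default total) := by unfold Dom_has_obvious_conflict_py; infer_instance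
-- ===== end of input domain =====

-- B replaces A's sort-then-take-second-element by a single count (second-largest >= threshold
-- iff at least two values >= threshold): simpler, no sort and no tuple tie-break.


-- ===== PORT A =====
def has_obvious_conflict_py (counts : List (String × Int)) (default : String) (total : Int) : Bool :=
  -- active = []; for key, value in counts.items(): … active.append((key, value))
  let active := counts.foldl (fun acc kv =>
    if kv.1 = default then acc
    else if kv.2 ≤ 0 then acc
    else acc ++ [(kv.1, kv.2)]) []
  if active.length ≤ 1 then false
  else
    -- active.sort(key=lambda item: (-item[1], item[0]))
    let s := PySem.List.sorted2 active (fun it => -it.2) (fun it => it.1)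
    -- index 1 is in range here (length ≥ 2), so the Python IndexError path is unreachable
    if max 2 (PySem.Int.floordiv (total + 2) 3) ≤ (PySem.List.pyGetD s 1 ("", 0)).2 then true
    else false

-- ===== PORT B =====
def has_obvious_conflict_py_alt (counts : List (String × Int)) (default : String) (total : Int) : Bool :=
  let vals := (counts.filter (fun kv => kv.1 != default && decide (0 < kv.2))).map (fun kv => kv.2)
  if vals.length < 2 then false
  else
    let threshold := max 2 (PySem.Int.floordiv (total + 2) 3)
    decide (2 ≤ vals.countP (fun v => decide (threshold ≤ v)))

-- ===== PRECONDITION & SPEC =====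
def Spec_has_obvious_conflict_py (counts : List (String × Int)) (default : String) (total : Int) (out : Bool) : Prop := out = has_obvious_conflict_py_alt counts default total
instance (counts : List (String × Int)) (default : String) (total : Int) (out : Bool) : Decidable (Spec_has_obvious_conflict_py counts default total out) := by unfold Spec_has_obvious_conflict_py; infer_instance

-- ===== CLAIM (what is proved, stated in full; the proofs are below) =====
def Claim_equal_has_obvious_conflict_py : Prop := ∀ (counts : List (String × Int)) (default : String) (total : Int), Dom_has_obvious_conflict_py counts default total → Spec_has_obvious_conflict_py counts default total (has_obvious_conflict_py counts default total)

-- ===== LEMMAS AND PROOFS =====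

-- insertBy into a Pairwise-R list stays Pairwise R (R a total preorder compatible with `before`)
theorem insertBy_pairwise {α : Type} (R : α → α → Prop) (before : α → α → Bool)
    (h1 : ∀ a b, before a b = true → R a b) (h2 : ∀ a b, before a b = false → R b a)
    (htr : ∀ a b c, R a b → R b c → R a c) (x : α) :
    ∀ (acc : List α), acc.Pairwise R → (PySem.List.insertBy before x acc).Pairwise R := by
  intro acc
  induction acc with
  | nil => intro _; simp [PySem.List.insertBy]
  | cons y ys ih =>
    intro hp
    rw [List.pairwise_cons] at hp
    obtain ⟨hy, hys⟩ := hp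
    by_cases hb : before x y = true
    · have hxy : R x y := h1 _ _ hb
      simp only [PySem.List.insertBy, hb, if_pos]
      refine List.Pairwise.cons ?_ (List.Pairwise.cons hy hys)
      intro z hz
      rcases List.mem_cons.mp hz with rfl | hz'
      · exact hxy
      · exact htr _ _ _ hxy (hy z hz')
    · have hb' : before x y = false := by simpa using hb
      simp only [PySem.List.insertBy, hb', if_neg, Bool.false_eq_true, not_false_iff]
      refine List.Pairwise.cons ?_ (ih hys)
      intro z hz
      rcases (PySem.List.mem_insertBy before x z ys).mp hz with rfl | hz'
      · exact h2 _ _ hb'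
      · exact hy z hz'

theorem foldl_insertBy_pairwise {α : Type} (R : α → α → Prop) (before : α → α → Bool)
    (h1 : ∀ a b, before a b = true → R a b) (h2 : ∀ a b, before a b = false → R b a)
    (htr : ∀ a b c, R a b → R b c → R a c) :
    ∀ (xs acc : List α), acc.Pairwise R →
      (xs.foldl (fun acc x => PySem.List.insertBy before x acc) acc).Pairwise R := by
  intro xs
  induction xs with
  | nil => intro acc hp; simpa using hp
  | cons x xs ih =>
    intro acc hp
    exact ih _ (insertBy_pairwise R before h1 h2 htr x acc hp)

-- sorted2 by (-value, name) yields values in non-increasing order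
theorem sorted2_vals_pairwise (xs : List (String × Int)) :
    (PySem.List.sorted2 xs (fun it => -it.2) (fun it => it.1)).Pairwise
      (fun a b => b.2 ≤ a.2) := by
  show (List.foldl _ [] xs).Pairwise _
  refine foldl_insertBy_pairwise _ _ ?_ ?_ ?_ xs [] (by simp)
  · intro a b h
    simp only [Bool.false_eq_true, if_false, Bool.or_eq_true, Bool.and_eq_true,
      decide_eq_true_eq, Bool.not_eq_true', decide_eq_false_iff_not] at h
    rcases h with h | ⟨h, _⟩ <;> omega
  · intro a b h
    simp only [Bool.false_eq_true, if_false, Bool.or_eq_false_iff] at h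
    have h1 := h.1
    simp only [decide_eq_false_iff_not] at h1
    omega
  · intro a b c h1 h2; dsimp at *; omega

-- A's accumulator loop is a filter
theorem activeA_eq_filter (counts : List (String × Int)) (default : String) :
    counts.foldl (fun acc kv =>
      if kv.1 = default then acc
      else if kv.2 ≤ 0 then acc
      else acc ++ [(kv.1, kv.2)]) []
    = counts.filter (fun kv => kv.1 != default && decide (0 < kv.2)) := by
  suffices h : ∀ (l : List (String × Int)) (acc : List (String × Int)),
      l.foldl (fun acc kv =>
        if kv.1 = default then acc
        else if kv.2 ≤ 0 then acc
        else acc ++ [(kv.1, kv.2)]) acc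
      = acc ++ l.filter (fun kv => kv.1 != default && decide (0 < kv.2)) by
    simpa using h counts []
  intro l
  induction l with
  | nil => intro acc; simp
  | cons kv t ih =>
    intro acc
    simp only [List.foldl_cons, List.filter_cons]
    by_cases hk : kv.1 = default
    · simp [hk, ih]
    · by_cases hv : kv.2 ≤ 0
      · have : ¬ (0 : Int) < kv.2 := by omega
        simp [hk, hv, this, ih]
      · have : (0 : Int) < kv.2 := by omega
        simp [hk, hv, this, ih]

-- second element of a value-nonincreasing list is ≥ t iff at least two elements are
theorem second_ge_iff (a0 a1 : String × Int) (rest : List (String × Int)) (t : Int)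
    (hp : (a0 :: a1 :: rest).Pairwise (fun a b => b.2 ≤ a.2)) :
    (t ≤ a1.2) ↔ 2 ≤ (a0 :: a1 :: rest).countP (fun p => decide (t ≤ p.2)) := by
  rw [List.pairwise_cons] at hp
  obtain ⟨h0, hp1⟩ := hp
  rw [List.pairwise_cons] at hp1
  obtain ⟨h1, _⟩ := hp1
  constructor
  · intro h
    have h0' : t ≤ a0.2 := le_trans h (h0 a1 (by simp))
    simp [h, h0']
  · intro h
    by_contra hlt
    have hz : (a1 :: rest).countP (fun p => decide (t ≤ p.2)) = 0 := by
      rw [List.countP_eq_zero]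
      intro z hz
      rcases List.mem_cons.mp hz with rfl | hz'
      · simpa using hlt
      · have := h1 z hz'
        simp only [decide_eq_true_eq]
        omega
    simp only [List.countP_cons, hz] at h
    split at h <;> omega

-- ===== VERDICT (by name: the statement is the Claim_ definition above) =====
theorem has_obvious_conflict_py_spec : Claim_equal_has_obvious_conflict_py := by
  intro counts default total _
  show has_obvious_conflict_py counts default total = has_obvious_conflict_py_alt counts default total
  unfold has_obvious_conflict_py has_obvious_conflict_py_alt
  rw [activeA_eq_filter]
  set active := counts.filter (fun kv => kv.1 != default && decide (0 < kv.2)) with hact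
  simp only [List.length_map]
  by_cases hlen : active.length ≤ 1
  · have : active.length < 2 := by omega
    simp [hlen, this]
  · have hlen2 : 2 ≤ active.length := by omega
    have hnot : ¬ active.length < 2 := by omega
    simp only [hlen, if_false, hnot]
    have hperm : (PySem.List.sorted2 active (fun it => -it.2) (fun it => it.1)).Perm active :=
      PySem.List.sorted2_perm ..
    have hslen : 2 ≤ (PySem.List.sorted2 active (fun it => -it.2) (fun it => it.1)).length := by
      rw [hperm.length_eq]; exact hlen2
    obtain ⟨a0, a1, rest, hs⟩ : ∃ a0 a1 rest,
        PySem.List.sorted2 active (fun it => -it.2) (fun it => it.1) = a0 :: a1 :: rest := by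
      rcases hq : PySem.List.sorted2 active (fun it => -it.2) (fun it => it.1) with _ | ⟨x, _ | ⟨y, t⟩⟩ <;>
        rw [hq] at hslen
      · simp at hslen
      · simp at hslen
      · exact ⟨x, y, t, rfl⟩
    rw [hs] at hperm ⊢
    have hget : PySem.List.pyGetD (a0 :: a1 :: rest) 1 ("", 0) = a1 := by
      rw [show (1 : Int) = ((1 : Nat) : Int) from rfl, PySem.List.pyGetD_natCast]
      rfl
    rw [hget]
    set t := max 2 (PySem.Int.floordiv (total + 2) 3) with ht
    have hpair := sorted2_vals_pairwise active
    rw [hs] at hpair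
    have hiff := second_ge_iff a0 a1 rest t hpair
    have hcnt : (a0 :: a1 :: rest).countP (fun p => decide (t ≤ p.2))
        = (active.map (fun kv => kv.2)).countP (fun v => decide (t ≤ v)) := by
      rw [hperm.countP_eq, List.countP_map]
      rfl
    rw [hcnt] at hiff
    by_cases hc : t ≤ a1.2
    · rw [if_pos hc]
      exact (decide_eq_true (hiff.mp hc)).symm
    · rw [if_neg hc]
      exact (decide_eq_false (fun h => hc (hiff.mpr h))).symm
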